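-- pv_equiv track=rewrite | github.com/sysll/HA_CA | models/attn/fca.py | get_freq_indices
-- ===== SOURCE A (Python) =====
-- def get_freq_indices(method, n_components, H, W):
--     """
--     获取选中的 DCT 频率坐标列表 (u, v)
--     支持常见策略：'low'（低频）、'top16'（近似高能量）、'NAS'（论文中 NAS 选的最佳组合）
--     """
--     dct_basis = []
--     for h in range(H):
--         for w in range(W):
--             dct_basis.append((h, w))
--
--     # 按频率总和 (u + v) 从小到大排序（低频优先）
--     dct_basis.sort(key=lambda x: x[0] + x[1])
--
--     if method == 'low':
--         return dct_basis[:n_components]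
--
--     elif method == 'top16':
--         # 官方常用 top16，这里用前 16 个低频作为近似（实际官方有固定位置，但简化用低频）
--         return dct_basis[:16]
--
--     elif method == 'NAS':
--         # 来自官方论文/代码中 NAS 选出的经典 16 个频率坐标（常见配置）
--         nas_coords = [
--             (0, 0), (0, 1), (1, 0), (0, 2), (2, 0), (1, 1),
--             (0, 3), (3, 0), (1, 2), (2, 1), (0, 4), (4, 0),
--             (2, 2), (1, 3), (3, 1), (0, 5)
--         ]
--         return nas_coords[:n_components]
--
--     else:
--         raise ValueError(f"Unsupported freq_sel_method: {method}")
-- ===== SOURCE B (Python) =====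
-- _NAS_COORDS = [
--     (0, 0), (0, 1), (1, 0), (0, 2), (2, 0), (1, 1),
--     (0, 3), (3, 0), (1, 2), (2, 1), (0, 4), (4, 0),
--     (2, 2), (1, 3), (3, 1), (0, 5)
-- ]
--
--
-- def _diag_block(H, W, s):
--     # coordinates of the diagonal h + w == s, h ascending, within the H x W grid
--     return [(h, s - h) for h in range(max(0, s - (W - 1)), min(s, H - 1) + 1)]
--
--
-- def get_freq_indices(method, n_components, H, W):
--     """
--     获取选中的 DCT 频率坐标列表 (u, v)
--     支持常见策略：'low'（低频）、'top16'（近似高能量）、'NAS'（论文中 NAS 选的最佳组合）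
--     """
--     if method == 'NAS':
--         return _NAS_COORDS[:n_components]
--
--     if method == 'low':
--         k = n_components
--     elif method == 'top16':
--         k = 16
--     else:
--         raise ValueError(f"Unsupported freq_sel_method: {method}")
--
--     # Enumerate diagonal by diagonal (s = h + w ascending, h ascending within a
--     # diagonal): exactly the order the stable sort in the original produces.
--     basis = [p for s in range(H + W - 1) for p in _diag_block(H, W, s)]
--     return basis[:k]
-- ===== Notes on version B (the rewrite author's own statement) =====
-- stated objective: faster
-- what changed: Replaces build-all-pairs-then-stable-sort-by-(h+w) with a direct diagonal enumeration (flatMap of per-diagonal blocks, s ascending, h ascending inside each diagonal) that emits the coordinates already sorted, and restructures the dispatch: NAS is answered first and the two grid-based methods share one slice through a selected length k.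
import Mathlib
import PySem

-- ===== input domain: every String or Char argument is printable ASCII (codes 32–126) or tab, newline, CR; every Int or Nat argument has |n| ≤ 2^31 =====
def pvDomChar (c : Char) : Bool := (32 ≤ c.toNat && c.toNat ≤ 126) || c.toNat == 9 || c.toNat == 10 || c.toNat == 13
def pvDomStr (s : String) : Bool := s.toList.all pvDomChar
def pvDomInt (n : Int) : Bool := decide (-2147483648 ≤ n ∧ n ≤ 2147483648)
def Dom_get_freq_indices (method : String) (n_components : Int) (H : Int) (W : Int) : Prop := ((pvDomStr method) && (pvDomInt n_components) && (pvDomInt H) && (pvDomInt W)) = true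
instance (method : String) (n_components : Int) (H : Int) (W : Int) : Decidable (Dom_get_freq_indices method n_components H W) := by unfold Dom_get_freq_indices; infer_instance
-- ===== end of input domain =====

-- B replaces A's build-all-pairs-then-stable-sort-by-(h+w) with a direct diagonal
-- enumeration (flatMap of per-diagonal blocks) that emits the coordinates already
-- in that order, and dispatches NAS first with one shared slice for the grid methods.

-- ===== PORT A =====
def get_freq_indices (method : String) (n_components : Int) (H : Int) (W : Int) : List (Int × Int) :=
  -- dct_basis = [] ; for h in range(H): for w in range(W): dct_basis.append((h, w))
  let dct_basis : List (Int × Int) :=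
    (PySem.List.pyRange 0 H).foldl
      (fun acc h => (PySem.List.pyRange 0 W).foldl (fun acc2 w => acc2 ++ [(h, w)]) acc) []
  -- dct_basis.sort(key=lambda x: x[0] + x[1])  (stable); Lean is strict, so the
  -- sorted list is written at the two places that read it (same computation)
  if method == "low" then
    PySem.List.slice (PySem.List.sorted dct_basis (fun x => x.1 + x.2) false) none (some n_components)
  else if method == "top16" then
    PySem.List.slice (PySem.List.sorted dct_basis (fun x => x.1 + x.2) false) none (some 16)
  else if method == "NAS" then
    PySem.List.slice
      [(0, 0), (0, 1), (1, 0), (0, 2), (2, 0), (1, 1),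
       (0, 3), (3, 0), (1, 2), (2, 1), (0, 4), (4, 0),
       (2, 2), (1, 3), (3, 1), (0, 5)] none (some n_components)
  else
    []  -- Python raises ValueError here; excluded by Pre_get_freq_indices

-- ===== PORT B =====
-- _NAS_COORDS
def pvNasCoords : List (Int × Int) :=
  [(0, 0), (0, 1), (1, 0), (0, 2), (2, 0), (1, 1),
   (0, 3), (3, 0), (1, 2), (2, 1), (0, 4), (4, 0),
   (2, 2), (1, 3), (3, 1), (0, 5)]

-- _diag_block: coordinates of the diagonal h + w == s, h ascending, within the grid
def pvDiagBlock (H W s : Int) : List (Int × Int) :=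
  (PySem.List.pyRange (max 0 (s - (W - 1))) (min s (H - 1) + 1)).map (fun h => (h, s - h))

def get_freq_indices_alt (method : String) (n_components : Int) (H : Int) (W : Int) : List (Int × Int) :=
  if method == "NAS" then
    PySem.List.slice pvNasCoords none (some n_components)
  else
    -- k selection: 'low' → n_components, 'top16' → 16, otherwise ValueError
    match (if method == "low" then some n_components
           else if method == "top16" then some (16 : Int) else none) with
    | some k =>
        -- basis = [p for s in range(H + W - 1) for p in _diag_block(H, W, s)]
        PySem.List.slice
          ((PySem.List.pyRange 0 (H + W - 1)).flatMap (pvDiagBlock H W)) none (some k)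
    | none => []  -- Python raises ValueError here; excluded by Pre_get_freq_indices

-- ===== PRECONDITION & SPEC =====
-- Pre_ excludes exactly the methods on which A raises ValueError (the final else branch).
def Pre_get_freq_indices (method : String) (n_components : Int) (H : Int) (W : Int) : Prop :=
  method = "low" ∨ method = "top16" ∨ method = "NAS"
instance (method : String) (n_components : Int) (H : Int) (W : Int) : Decidable (Pre_get_freq_indices method n_components H W) := by unfold Pre_get_freq_indices; infer_instance

def pvWitness_get_freq_indices : String × Int × Int × Int := ("low", 3, 3, 3)

def Spec_get_freq_indices (method : String) (n_components : Int) (H : Int) (W : Int) (out : List (Int × Int)) : Prop := out = get_freq_indices_alt method n_components H W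
instance (method : String) (n_components : Int) (H : Int) (W : Int) (out : List (Int × Int)) : Decidable (Spec_get_freq_indices method n_components H W out) := by unfold Spec_get_freq_indices; infer_instance

-- ===== CLAIM (what is proved, stated in full; the proofs are below) =====
def Claim_equal_get_freq_indices : Prop := ∀ (method : String) (n_components : Int) (H : Int) (W : Int), Dom_get_freq_indices method n_components H W → Pre_get_freq_indices method n_components H W → Spec_get_freq_indices method n_components H W (get_freq_indices method n_components H W)

-- ===== LEMMAS AND PROOFS =====

-- the grid A builds (lexicographic order), in flatMap form
def pvGrid (H W : Int) : List (Int × Int) :=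
  (PySem.List.pyRange 0 H).flatMap (fun h => (PySem.List.pyRange 0 W).map (fun w => (h, w)))

-- B's full enumeration
def pvDiag (H W : Int) : List (Int × Int) :=
  (PySem.List.pyRange 0 (H + W - 1)).flatMap (pvDiagBlock H W)

-- one step of the stable insertion sort
def pvIns (x : Int × Int) (acc : List (Int × Int)) : List (Int × Int) :=
  PySem.List.insertBy (fun a b => decide (a.1 + a.2 < b.1 + b.2)) x acc

-- intermediate state while inserting row H: diagonals < H+w already extended
def pvMixed (H W w : Int) : List (Int × Int) :=
  (PySem.List.pyRange 0 (H + w)).flatMap (pvDiagBlock (H + 1) W)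
    ++ (PySem.List.pyRange (H + w) (H + W - 1)).flatMap (pvDiagBlock H W)

theorem pvRange_nil {a b : Int} (h : b ≤ a) : PySem.List.pyRange a b = [] := by
  simp [PySem.List.pyRange, Int.not_lt.mpr h]

theorem pvGridA_eq (H W : Int) :
    (PySem.List.pyRange 0 H).foldl
      (fun acc h => (PySem.List.pyRange 0 W).foldl (fun acc2 w => acc2 ++ [(h, w)]) acc) []
    = pvGrid H W := by
  simp only [PySem.List.foldl_append_singleton_eq_map, PySem.List.foldl_append_eq_flatMap,
    List.nil_append, pvGrid]

theorem pvKey_mem_block {H W s : Int} {y : Int × Int} (hy : y ∈ pvDiagBlock H W s) :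
    y.1 + y.2 = s := by
  simp only [pvDiagBlock, List.mem_map] at hy
  obtain ⟨h, _, rfl⟩ := hy
  simp

theorem pvInsert_middle (x : Int × Int) (ys zs : List (Int × Int))
    (h1 : ∀ y ∈ ys, ¬ (x.1 + x.2 < y.1 + y.2)) (h2 : ∀ z ∈ zs, x.1 + x.2 < z.1 + z.2) :
    pvIns x (ys ++ zs) = ys ++ x :: zs := by
  induction ys with
  | nil =>
    cases zs with
    | nil => simp [pvIns, PySem.List.insertBy]
    | cons z zs => simp [pvIns, PySem.List.insertBy, h2 z (by simp)]
  | cons y ys ih =>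
    have hy := h1 y (by simp)
    have ih' := ih (fun y' hy' => h1 y' (by simp [hy']))
    simp only [pvIns, List.cons_append, PySem.List.insertBy, decide_eq_true_eq, if_neg hy]
    simpa [pvIns] using ih'

theorem pvBlock_lower (H W s : Int) (hs : s < H) : pvDiagBlock (H + 1) W s = pvDiagBlock H W s := by
  unfold pvDiagBlock
  rw [show min s (H + 1 - 1) + 1 = min s (H - 1) + 1 by omega]

theorem pvBlock_top (H W w : Int) (hH : 0 ≤ H) (hw : 0 ≤ w) (hwW : w ≤ W - 1) :
    pvDiagBlock H W (H + w) ++ [(H, w)] = pvDiagBlock (H + 1) W (H + w) := by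
  unfold pvDiagBlock
  rw [show min (H + w) (H - 1) + 1 = H by omega,
      show min (H + w) (H + 1 - 1) + 1 = H + 1 by omega,
      PySem.List.pyRange_one_succ_right (by omega : max 0 (H + w - (W - 1)) ≤ H),
      List.map_append]
  simp

theorem pvMixed_zero (H W : Int) (hH : 0 ≤ H) (hW : 0 < W) : pvMixed H W 0 = pvDiag H W := by
  unfold pvMixed pvDiag
  rw [add_zero, PySem.List.pyRange_one_append 0 H (H + W - 1) hH (by omega), List.flatMap_append]
  congr 1
  apply List.flatMap_congr
  intro s hs
  exact pvBlock_lower H W s (PySem.List.mem_pyRange_one.mp hs).2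

theorem pvMixed_last (H W : Int) (hH : 0 ≤ H) (hW : 0 < W) :
    pvMixed H W W = pvDiag (H + 1) W := by
  unfold pvMixed pvDiag
  rw [pvRange_nil (by omega : H + W - 1 ≤ H + W), show H + 1 + W - 1 = H + W by ring]
  simp

theorem pvInsert_step (H W w : Int) (hH : 0 ≤ H) (hw : 0 ≤ w) (hwW : w < W) :
    pvIns (H, w) (pvMixed H W w) = pvMixed H W (w + 1) := by
  have hsplit : (PySem.List.pyRange (H + w) (H + W - 1)).flatMap (pvDiagBlock H W)
      = pvDiagBlock H W (H + w) ++ (PySem.List.pyRange (H + w + 1) (H + W - 1)).flatMap (pvDiagBlock H W) := by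
    by_cases hc : H + w < H + W - 1
    · rw [PySem.List.pyRange_one_cons hc, List.flatMap_cons]
    · have hb : pvDiagBlock H W (H + w) = [] := by
        unfold pvDiagBlock
        rw [pvRange_nil (by omega : min (H + w) (H - 1) + 1 ≤ max 0 (H + w - (W - 1)))]
        rfl
      rw [pvRange_nil (by omega), pvRange_nil (by omega), hb]
      rfl
  unfold pvMixed
  rw [hsplit, ← List.append_assoc]
  rw [pvInsert_middle (H, w)
        ((PySem.List.pyRange 0 (H + w)).flatMap (pvDiagBlock (H + 1) W) ++ pvDiagBlock H W (H + w))
        ((PySem.List.pyRange (H + w + 1) (H + W - 1)).flatMap (pvDiagBlock H W))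
        (by
          intro y hy
          rcases List.mem_append.mp hy with hy | hy
          · obtain ⟨s, hs, hmem⟩ := List.mem_flatMap.mp hy
            have := pvKey_mem_block hmem
            have hslt := (PySem.List.mem_pyRange_one.mp hs).2
            simp only
            omega
          · have := pvKey_mem_block hy
            simp only
            omega)
        (by
          intro z hz
          obtain ⟨s, hs, hmem⟩ := List.mem_flatMap.mp hz
          have := pvKey_mem_block hmem
          have hsge := (PySem.List.mem_pyRange_one.mp hs).1
          simp only
          omega)]
  rw [show ((PySem.List.pyRange 0 (H + w)).flatMap (pvDiagBlock (H + 1) W) ++ pvDiagBlock H W (H + w))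
        ++ (H, w) :: (PySem.List.pyRange (H + w + 1) (H + W - 1)).flatMap (pvDiagBlock H W)
      = (PySem.List.pyRange 0 (H + w)).flatMap (pvDiagBlock (H + 1) W)
        ++ (pvDiagBlock H W (H + w) ++ [(H, w)])
        ++ (PySem.List.pyRange (H + w + 1) (H + W - 1)).flatMap (pvDiagBlock H W) by simp]
  rw [pvBlock_top H W w hH hw (by omega)]
  rw [show H + (w + 1) = H + w + 1 by ring,
      PySem.List.pyRange_one_succ_right (by omega : (0 : Int) ≤ H + w),
      List.flatMap_append]
  simp

theorem pvFold_row (H W : Int) (hH : 0 ≤ H) :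
    ∀ (k : Nat) (w : Int), 0 ≤ w → w + k = W →
      List.foldl (fun acc x => pvIns x acc)
        (pvMixed H W w) ((PySem.List.pyRange w W).map (fun j => (H, j)))
      = pvMixed H W W := by
  intro k
  induction k with
  | zero =>
    intro w hw hwk
    have hwW : w = W := by simpa using hwk
    rw [hwW, pvRange_nil (le_refl W)]
    rfl
  | succ k ih =>
    intro w hw hwk
    have hwW : w < W := by push_cast at hwk; omega
    rw [PySem.List.pyRange_one_cons hwW, List.map_cons, List.foldl_cons,
        pvInsert_step H W w hH hw hwW]
    exact ih (w + 1) (by omega) (by push_cast at hwk ⊢; omega)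

theorem pvSorted_grid_pos (W : Int) (hW : 0 < W) :
    ∀ (n : Nat),
      PySem.List.sorted (pvGrid (n : Int) W) (fun x => x.1 + x.2) false = pvDiag (n : Int) W := by
  intro n
  induction n with
  | zero =>
    simp only [Nat.cast_zero]
    have hg : pvGrid 0 W = [] := by
      unfold pvGrid
      rw [pvRange_nil (show (0 : Int) ≤ 0 from le_refl 0)]
      rfl
    have hd : pvDiag 0 W = [] := by
      unfold pvDiag
      rw [List.flatMap_eq_nil_iff]
      intro s hs
      unfold pvDiagBlock
      have h1 : min s ((0 : Int) - 1) ≤ (0 : Int) - 1 := min_le_right _ _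
      have h2 : (0 : Int) ≤ max 0 (s - (W - 1)) := le_max_left _ _
      rw [pvRange_nil (by omega : min s ((0 : Int) - 1) + 1 ≤ max 0 (s - (W - 1)))]
      rfl
    rw [hg, hd]
    rfl
  | succ n ih =>
    have hcast : ((n + 1 : Nat) : Int) = (n : Int) + 1 := by push_cast; ring
    rw [hcast]
    have hgrid : pvGrid ((n : Int) + 1) W
        = pvGrid (n : Int) W ++ (PySem.List.pyRange 0 W).map (fun w => ((n : Int), w)) := by
      unfold pvGrid
      rw [PySem.List.pyRange_one_succ_right (by positivity : (0 : Int) ≤ (n : Int)),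
          List.flatMap_append]
      simp
    rw [hgrid, PySem.List.sorted_eq_foldl_insertBy, List.foldl_append,
        ← PySem.List.sorted_eq_foldl_insertBy, ih,
        ← pvMixed_zero (n : Int) W (by positivity) hW]
    have hfold := pvFold_row (n : Int) W (by positivity) W.toNat 0 (le_refl 0)
      (by simp [Int.toNat_of_nonneg (le_of_lt hW)])
    rw [show (List.foldl
          (fun acc x => PySem.List.insertBy (fun a b => decide (a.1 + a.2 < b.1 + b.2)) x acc)
          (pvMixed (n : Int) W 0) ((PySem.List.pyRange 0 W).map (fun w => ((n : Int), w))))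
        = (List.foldl (fun acc x => pvIns x acc)
          (pvMixed (n : Int) W 0) ((PySem.List.pyRange 0 W).map (fun j => ((n : Int), j)))) from rfl]
    rw [hfold]
    exact pvMixed_last (n : Int) W (by positivity) hW

theorem pvSorted_grid (H W : Int) :
    PySem.List.sorted (pvGrid H W) (fun x => x.1 + x.2) false = pvDiag H W := by
  by_cases hW : 0 < W
  · by_cases hH : 0 < H
    · have := pvSorted_grid_pos W hW H.toNat
      rwa [Int.toNat_of_nonneg (le_of_lt hH)] at this
    · have hg : pvGrid H W = [] := by
        unfold pvGrid
        rw [pvRange_nil (show H ≤ (0 : Int) by omega)]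
        rfl
      have hd : pvDiag H W = [] := by
        unfold pvDiag
        rw [List.flatMap_eq_nil_iff]
        intro s hs
        unfold pvDiagBlock
        have h1 : min s (H - 1) ≤ H - 1 := min_le_right _ _
        have h2 : (0 : Int) ≤ max 0 (s - (W - 1)) := le_max_left _ _
        rw [pvRange_nil (by omega : min s (H - 1) + 1 ≤ max 0 (s - (W - 1)))]
        rfl
      rw [hg, hd]
      rfl
  · have hg : pvGrid H W = [] := by
      unfold pvGrid
      rw [List.flatMap_eq_nil_iff]
      intro h hh
      rw [pvRange_nil (show W ≤ (0 : Int) by omega)]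
      rfl
    have hd : pvDiag H W = [] := by
      unfold pvDiag
      rw [List.flatMap_eq_nil_iff]
      intro s hs
      have hs0 : 0 ≤ s := (PySem.List.mem_pyRange_one.mp hs).1
      unfold pvDiagBlock
      have h1 : min s (H - 1) ≤ s := min_le_left _ _
      have h2 : s - (W - 1) ≤ max 0 (s - (W - 1)) := le_max_right _ _
      rw [pvRange_nil (by omega : min s (H - 1) + 1 ≤ max 0 (s - (W - 1)))]
      rfl
    rw [hg, hd]
    rfl

-- ===== VERDICT (by name: the statement is the Claim_ definition above) =====
theorem get_freq_indices_spec : Claim_equal_get_freq_indices := by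
  intro method n H W _ hpre
  unfold Spec_get_freq_indices
  rcases hpre with h | h | h <;> subst h <;>
    · simp only [get_freq_indices, get_freq_indices_alt]
      rw [pvGridA_eq, pvSorted_grid]
      rfl
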